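-- pv_equiv track=rewrite | github.com/AssafHMor/codeJam | intro2cs-python/ex6/balanced_brackets.py | violated_parentheses
-- ===== SOURCE A (Python) =====
-- SINGLE_BRACKET = 1  # a single bracket appearance
--
-- INDEX_COUNTER = 1  # a single movement in the string index
--
-- OPEN_BRACKET = "("  # an open bracket
--
-- CLOSE_BRACKET = ")"  # a close bracket
--
-- def violated_parentheses(s, stack, index):
--     """
--     this is a recursive method which checks for the violation of the
--     parentheses balance and returns the index of violation or the length
--     of the string if its possible to balance the whole string
--     :param s: the string to check
--     :param stack: the stack to follow the number of brackets appearances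
--     :param index: the current index of the character in the string
--     :return: the length of the string or the index of violation
--     """
--     # the stopping condition - if the string has ended
--     if len(s) == index:
--         return index  # return the current index if string ended
--
--     # if current index is ( all is good so far
--     elif s[index] == OPEN_BRACKET:
--         stack += SINGLE_BRACKET  # add 1 to stack to keep track
--         index += INDEX_COUNTER  # advance on the string index
--         # continue with the inquiry on the rest of the string with the new
--         # updated stack
--         return violated_parentheses(s, stack, index)
--
--     # if current index is ) check for  two options
--     elif s[index] == CLOSE_BRACKET:
--
--         # if the stack is empty return the current index because it is not
--         # possible to balance the whole string anymore
--         if stack == 0: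
--             return index
--
--         # if the stack is not empty
--         else:
--             stack -= SINGLE_BRACKET  # subtract 1 from the stack to keep track
--             index += INDEX_COUNTER  # advance on the string index
--             # continue with the inquiry on the rest of the string with the new
--             # updated stack
--             return violated_parentheses(s, stack, index)
--
--     # if the next index is not a '(' or a ')'
--     else:
--         index += INDEX_COUNTER  # advance on the string index
--         # continue with the inquiry on the rest of the string with the current
--         # stack
--         return violated_parentheses(s, stack, index)
-- ===== SOURCE B (Python) =====
-- def violated_parentheses(s, stack, index):
--     """Iterative re-implementation: walk the string with a running counter
--     instead of recursing; same return value (and same IndexError behaviour,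
--     since s[i] is read unguarded)."""
--     n = len(s)
--     count = stack
--     i = index
--     while i != n:
--         c = s[i]
--         if c == ")":
--             if count == 0:
--                 return i
--             count -= 1
--         elif c == "(":
--             count += 1
--         i += 1
--     return i
-- ===== Notes on version B (the rewrite author's own statement) =====
-- stated objective: simpler
-- what changed: Replaced the one-character-per-call recursion by a single iterative while-loop carrying a running counter (and checking the close bracket first), avoiding Python call overhead and recursion-depth limits.
import Mathlib
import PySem

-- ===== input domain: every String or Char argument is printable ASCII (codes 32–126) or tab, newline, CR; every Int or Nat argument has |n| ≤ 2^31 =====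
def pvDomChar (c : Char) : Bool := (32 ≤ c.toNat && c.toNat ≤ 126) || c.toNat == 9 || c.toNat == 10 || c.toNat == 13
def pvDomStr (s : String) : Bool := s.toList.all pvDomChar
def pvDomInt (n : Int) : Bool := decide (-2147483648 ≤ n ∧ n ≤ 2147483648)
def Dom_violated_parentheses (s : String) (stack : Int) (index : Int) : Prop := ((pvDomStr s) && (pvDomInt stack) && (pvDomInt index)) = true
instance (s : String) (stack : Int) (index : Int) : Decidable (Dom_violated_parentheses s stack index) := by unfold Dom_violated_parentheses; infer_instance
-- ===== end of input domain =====

-- B replaces A's one-character-per-call recursion by an iterative walk with a running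
-- counter (close bracket checked first); same return value on every in-range index.


-- ===== PORT A =====
-- literal port of the recursion; 0 in the `none` branch marks the IndexError inputs,
-- which Pre_violated_parentheses excludes
def violated_parentheses (s : String) (stack : Int) (index : Int) : Int :=
  if (PySem.Str.len s : Int) = index then index
  else
    match h : PySem.Str.pyGet? s index with
    | some c =>
      if c = '(' then violated_parentheses s (stack + 1) (index + 1)
      else if c = ')' then
        if stack = 0 then index
        else violated_parentheses s (stack - 1) (index + 1)
      else violated_parentheses s stack (index + 1)
    | none => 0
termination_by ((PySem.Str.len s : Int) - index).toNat
decreasing_by all_goals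
  · have hr : PySem.Raise.InRange s.toList.length index := by
      by_contra hc
      simp only [PySem.Str.pyGet?_eq, PySem.Chars.pyGet?_eq_listPyGet?] at h
      rw [(PySem.List.pyGet?_eq_none_iff _ _).mpr hc] at h
      simp at h
    unfold PySem.Raise.InRange at hr
    simp [PySem.Str.len] at *
    omega

-- ===== PORT B =====
-- port of Source B's while-loop: state (count, i), close bracket tested first
def vpLoop (cs : List Char) (count : Int) (i : Int) : Int :=
  if i = (cs.length : Int) then i
  else
    match h : PySem.List.pyGet? cs i with
    | none => 0
    | some c =>
      if c = ')' then
        if count = 0 then i else vpLoop cs (count - 1) (i + 1)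
      else if c = '(' then vpLoop cs (count + 1) (i + 1)
      else vpLoop cs count (i + 1)
termination_by ((cs.length : Int) - i).toNat
decreasing_by all_goals
  · have hr : PySem.Raise.InRange cs.length i := by
      by_contra hc
      rw [(PySem.List.pyGet?_eq_none_iff _ _).mpr hc] at h
      simp at h
    unfold PySem.Raise.InRange at hr
    omega

def violated_parentheses_alt (s : String) (stack : Int) (index : Int) : Int :=
  vpLoop s.toList stack index

-- ===== PRECONDITION & SPEC =====
-- exactly the inputs on which the Python A returns (index out of [-len, len] raises IndexError)
def Pre_violated_parentheses (s : String) (stack : Int) (index : Int) : Prop :=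
  -(s.toList.length : Int) ≤ index ∧ index ≤ (s.toList.length : Int)
instance (s : String) (stack : Int) (index : Int) : Decidable (Pre_violated_parentheses s stack index) := by unfold Pre_violated_parentheses; infer_instance

def pvWitness_violated_parentheses : String × Int × Int := ("(a)(", 0, 0)

def Spec_violated_parentheses (s : String) (stack : Int) (index : Int) (out : Int) : Prop := out = violated_parentheses_alt s stack index
instance (s : String) (stack : Int) (index : Int) (out : Int) : Decidable (Spec_violated_parentheses s stack index out) := by unfold Spec_violated_parentheses; infer_instance

-- ===== CLAIM (what is proved, stated in full; the proofs are below) =====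
def Claim_equal_violated_parentheses : Prop := ∀ (s : String) (stack : Int) (index : Int), Dom_violated_parentheses s stack index → Pre_violated_parentheses s stack index → Spec_violated_parentheses s stack index (violated_parentheses s stack index)

-- ===== LEMMAS AND PROOFS =====

theorem vp_eq_loop (s : String) (stack index : Int) :
    violated_parentheses s stack index = vpLoop s.toList stack index := by
  rw [violated_parentheses, vpLoop]
  by_cases hend : (PySem.Str.len s : Int) = index
  · have h2 : index = ((s.toList.length : Nat) : Int) := by
      simp at hend ⊢; omega
    rw [if_pos hend, if_pos h2]
  · have h2 : ¬ index = ((s.toList.length : Nat) : Int) := by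
      simp at hend ⊢; omega
    rw [if_neg hend, if_neg h2]
    simp only [PySem.Str.pyGet?_eq, PySem.Chars.pyGet?_eq_listPyGet?]
    cases h : PySem.List.pyGet? s.toList index with
    | none => rfl
    | some c =>
      have hr : PySem.Raise.InRange s.toList.length index := by
        by_contra hc
        rw [(PySem.List.pyGet?_eq_none_iff _ _).mpr hc] at h
        simp at h
      dsimp only
      by_cases h1 : c = '('
      · rw [if_pos h1, if_neg (show ¬ c = ')' by simp [h1]), if_pos h1]
        exact vp_eq_loop s (stack + 1) (index + 1)
      · by_cases hc2 : c = ')'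
        · rw [if_neg h1, if_pos hc2, if_pos hc2]
          by_cases h3 : stack = 0
          · rw [if_pos h3, if_pos h3]
          · rw [if_neg h3, if_neg h3]
            exact vp_eq_loop s (stack - 1) (index + 1)
        · rw [if_neg h1, if_neg hc2, if_neg hc2, if_neg h1]
          exact vp_eq_loop s stack (index + 1)
termination_by ((s.toList.length : Int) - index).toNat
decreasing_by all_goals
  unfold PySem.Raise.InRange at hr
  omega

-- ===== VERDICT (by name: the statement is the Claim_ definition above) =====
theorem violated_parentheses_spec : Claim_equal_violated_parentheses := by
  intro s stack index _ _
  unfold Spec_violated_parentheses violated_parentheses_alt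
  exact vp_eq_loop s stack index
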